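-- pv_equiv track=rewrite | github.com/Alvaropz/Python_problems_BinarySearch | 1. Easy/append_list_to_sum_target/append_list_to_sum_target.py | append_list_to_sum_target_optimised
-- ===== SOURCE A (Python) =====
-- def append_list_to_sum_target_optimised(nums, k, target):
--     total_sum = sum(nums)
--     count = 0
--     while total_sum != target:
--         if target > total_sum:
--             if total_sum + k <= target and k > 0:
--                 total_sum += k
--                 count += 1
--             if total_sum + k > target and k > 0:
--                 k -= 1
--         if total_sum > target:
--             if k > 0:
--                 k *= -1
--             if total_sum + k >= target and not total_sum + k < target:
--                 total_sum += k
--                 count += 1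
--             elif total_sum + k < target:
--                 k += 1
--     return count
-- ===== SOURCE B (Python) =====
-- def append_list_to_sum_target_optimised(nums, k, target):
--     gap = target - sum(nums)
--     if gap == 0:
--         return 0
--     gap, step, count = abs(gap), abs(k), 0
--     while gap:
--         count += gap // step
--         gap %= step
--         step -= 1
--     return count
-- ===== Notes on version B (the rewrite author's own statement) =====
-- stated objective: alternative
-- what changed: B replaces A's one-step-at-a-time while loop (adding/subtracting k repeatedly and decrementing k by comparisons) with one floor-division per k value: count += gap//step; gap %= step; step -= 1 over the absolute gap.
import Mathlib
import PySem

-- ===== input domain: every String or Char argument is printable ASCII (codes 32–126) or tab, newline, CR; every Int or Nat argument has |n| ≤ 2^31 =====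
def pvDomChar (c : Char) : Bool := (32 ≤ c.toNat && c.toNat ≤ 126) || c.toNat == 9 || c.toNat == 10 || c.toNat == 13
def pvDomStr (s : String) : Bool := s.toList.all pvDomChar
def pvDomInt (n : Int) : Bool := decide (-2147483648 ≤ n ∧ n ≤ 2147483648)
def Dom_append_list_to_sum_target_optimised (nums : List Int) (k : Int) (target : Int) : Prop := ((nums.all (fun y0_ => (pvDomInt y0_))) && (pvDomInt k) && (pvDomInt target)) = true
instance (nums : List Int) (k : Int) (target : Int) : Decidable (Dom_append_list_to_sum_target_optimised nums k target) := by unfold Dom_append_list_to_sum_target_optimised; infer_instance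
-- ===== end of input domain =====

-- B replaces A's one-step-at-a-time while loop by one floor-division per k value
-- (count += gap//step; gap %= step; step -= 1) over the absolute gap.

-- ===== PORT A =====
-- the 'if target > total_sum:' block of A's loop body (sequential mutations as lets)
def pvPosBlock (target s k c : Int) : Int × Int × Int :=
  if target > s then
    let s1 := if s + k ≤ target ∧ 0 < k then s + k else s
    let c1 := if s + k ≤ target ∧ 0 < k then c + 1 else c
    let k1 := if s1 + k > target ∧ 0 < k then k - 1 else k
    (s1, k1, c1)
  else (s, k, c)

-- the 'if total_sum > target:' block of A's loop body
def pvNegBlock (target s k c : Int) : Int × Int × Int :=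
  if s > target then
    let k2 := if 0 < k then -k else k
    if s + k2 ≥ target ∧ ¬ (s + k2 < target) then (s + k2, k2, c + 1)
    else if s + k2 < target then (s, k2 + 1, c)
    else (s, k2, c)
  else (s, k, c)

-- A's 'while total_sum != target' loop; the fuel argument is only a totality guard
-- (the supplied fuel is proved sufficient on Pre_, where the Python loop terminates)
def pvALoop (target : Int) : Nat → Int → Int → Int → Int
  | 0, _, _, c => c
  | fuel+1, s, k, c =>
    if s = target then c
    else
      let p := pvPosBlock target s k c
      let q := pvNegBlock target p.1 p.2.1 p.2.2
      pvALoop target fuel q.1 q.2.1 q.2.2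

def append_list_to_sum_target_optimised (nums : List Int) (k : Int) (target : Int) : Int :=
  let total_sum := nums.foldl (· + ·) 0
  pvALoop target ((target - total_sum).natAbs + k.natAbs + 1) total_sum k 0

-- ===== PORT B =====
-- B's 'while gap:' loop; the 'step ≤ 0' guard only makes the recursion total
-- (it is exactly where the Python B raises ZeroDivisionError, outside Pre_)
def pvAltLoop (gap step count : Int) : Int :=
  if gap = 0 then count
  else if step ≤ 0 then count
  else pvAltLoop (PySem.Int.mod gap step) (step - 1) (count + PySem.Int.floordiv gap step)
termination_by step.toNat
decreasing_by omega

def append_list_to_sum_target_optimised_alt (nums : List Int) (k : Int) (target : Int) : Int :=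
  let gap := target - nums.foldl (· + ·) 0
  if gap = 0 then 0
  else pvAltLoop |gap| |k| 0

-- ===== PRECONDITION & SPEC =====
-- Pre_ excludes exactly the inputs on which A's while loop never terminates (A returns no
-- value there): sum < target with k ≤ 0, and sum > target with k = 0.
def Pre_append_list_to_sum_target_optimised (nums : List Int) (k : Int) (target : Int) : Prop :=
  let s := nums.foldl (· + ·) 0
  s = target ∨ (s < target ∧ 0 < k) ∨ (target < s ∧ k ≠ 0)
instance (nums : List Int) (k : Int) (target : Int) : Decidable (Pre_append_list_to_sum_target_optimised nums k target) := by unfold Pre_append_list_to_sum_target_optimised; infer_instance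

def pvWitness_append_list_to_sum_target_optimised : List Int × Int × Int := ([3], 2, 10)

def Spec_append_list_to_sum_target_optimised (nums : List Int) (k : Int) (target : Int) (out : Int) : Prop := out = append_list_to_sum_target_optimised_alt nums k target
instance (nums : List Int) (k : Int) (target : Int) (out : Int) : Decidable (Spec_append_list_to_sum_target_optimised nums k target out) := by unfold Spec_append_list_to_sum_target_optimised; infer_instance

-- ===== CLAIM (what is proved, stated in full; the proofs are below) =====
def Claim_equal_append_list_to_sum_target_optimised : Prop := ∀ (nums : List Int) (k : Int) (target : Int), Dom_append_list_to_sum_target_optimised nums k target → Pre_append_list_to_sum_target_optimised nums k target → Spec_append_list_to_sum_target_optimised nums k target (append_list_to_sum_target_optimised nums k target)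

-- ===== LEMMAS AND PROOFS =====

theorem pvALoop_at_target (target : Int) (f : Nat) (k c : Int) :
    pvALoop target f target k c = c := by
  cases f <;> simp [pvALoop]

-- altLoop ignores a step value larger than the (nonnegative) gap
theorem pvAltLoop_skip (gap step c : Int) (h0 : 0 ≤ gap) (h : gap < step) :
    pvAltLoop gap step c = pvAltLoop gap (step - 1) c := by
  by_cases hg : gap = 0
  · subst hg
    conv_lhs => rw [pvAltLoop]
    conv_rhs => rw [pvAltLoop]
    simp
  · rw [pvAltLoop]
    have hstep : ¬ step ≤ 0 := by omega
    have hdiv : PySem.Int.floordiv gap step = 0 := by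
      rw [PySem.Int.floordiv_eq_ediv_of_pos (by omega)]
      exact Int.ediv_eq_zero_of_lt h0 h
    have hmod : PySem.Int.mod gap step = gap := by
      rw [PySem.Int.mod_eq_emod_of_pos (by omega)]
      exact Int.emod_eq_of_lt h0 h
    simp [hg, hstep, hdiv, hmod]

-- one subtraction of step from the gap is one unit of altLoop's count
theorem pvAltLoop_sub (gap step c : Int) (hk : 0 < step) (h : step ≤ gap) :
    pvAltLoop gap step c = pvAltLoop (gap - step) step (c + 1) := by
  have hg : gap ≠ 0 := by omega
  rw [pvAltLoop]
  have hstep : ¬ step ≤ 0 := by omega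
  by_cases he : gap - step = 0
  · have : gap = step := by omega
    subst this
    have hdiv : PySem.Int.floordiv gap gap = 1 := by
      rw [PySem.Int.floordiv_eq_ediv_of_pos hk]; exact Int.ediv_self hg
    have hmod : PySem.Int.mod gap gap = 0 := by
      rw [PySem.Int.mod_eq_emod_of_pos hk]; simp
    rw [pvAltLoop]
    simp [hg, hstep, hdiv, hmod, pvAltLoop]
  · conv_rhs => rw [pvAltLoop]
    have hdiv : PySem.Int.floordiv gap step = PySem.Int.floordiv (gap - step) step + 1 := by
      rw [PySem.Int.floordiv_eq_ediv_of_pos hk, PySem.Int.floordiv_eq_ediv_of_pos hk]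
      have h2 := Int.add_mul_ediv_right (gap - step) 1 (show step ≠ 0 by omega)
      have h3 : gap - step + 1 * step = gap := by ring
      rw [h3] at h2
      rw [h2]
    have hmod : PySem.Int.mod gap step = PySem.Int.mod (gap - step) step := by
      rw [PySem.Int.mod_eq_emod_of_pos hk, PySem.Int.mod_eq_emod_of_pos hk]
      exact (Int.sub_emod_right gap step).symm
    simp only [hg, hstep, he, if_false]
    rw [hdiv, hmod]
    ring_nf

-- the positive side: sum < target, 0 < k
theorem pvALoop_pos (target : Int) : ∀ (fuel : Nat) (s k c : Int), s < target → 0 < k →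
    (target - s).toNat + k.toNat ≤ fuel →
    pvALoop target fuel s k c = pvAltLoop (target - s) k c := by
  intro fuel
  induction fuel with
  | zero => intro s k c hs hk hf; omega
  | succ f ih =>
    intro s k c hs hk hf
    have hne : s ≠ target := by omega
    rw [pvALoop]
    simp only [hne, if_false]
    by_cases hle : s + k ≤ target
    · -- k fits: add it
      have hpb : pvPosBlock target s k c =
          (s + k, if s + k + k > target ∧ 0 < k then k - 1 else k, c + 1) := by
        simp [pvPosBlock, hs, hle, hk]
      rw [hpb]
      have hnb : ∀ k' c', pvNegBlock target (s + k) k' c' = (s + k, k', c') := by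
        intro k' c'; simp [pvNegBlock]; omega
      by_cases hdone : s + k = target
      · rw [hnb]
        simp only
        rw [hdone, pvALoop_at_target]
        rw [pvAltLoop_sub (target - s) k c hk (by omega)]
        have h0 : target - s - k = 0 := by omega
        rw [h0, pvAltLoop]
        simp
      · have hlt : s + k < target := by omega
        rw [hnb]; simp only
        by_cases h2 : s + k + k > target
        · -- k shrinks to k-1
          have hk1 : 0 < k - 1 := by omega
          have hfu : (target - (s + k)).toNat + (k - 1).toNat ≤ f := by omega
          have e1 : (if s + k + k > target ∧ 0 < k then k - 1 else k) = k - 1 := by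
            rw [if_pos ⟨h2, hk⟩]
          rw [e1]
          rw [ih (s + k) (k - 1) (c + 1) hlt hk1 hfu]
          rw [pvAltLoop_sub (target - s) k c hk (by omega),
              pvAltLoop_skip (target - s - k) k (c + 1) (by omega) (by omega)]
          congr 1; omega
        · have e1 : (if s + k + k > target ∧ 0 < k then k - 1 else k) = k := by
            rw [if_neg]; intro hx; exact h2 hx.1
          rw [e1]
          have hfu : (target - (s + k)).toNat + k.toNat ≤ f := by omega
          rw [ih (s + k) k (c + 1) hlt hk hfu]
          rw [pvAltLoop_sub (target - s) k c hk (by omega)]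
          congr 1; omega
    · -- k too big: only shrink k
      have hk2 : 2 ≤ k := by omega
      have hpb : pvPosBlock target s k c = (s, k - 1, c) := by
        simp [pvPosBlock, hs, hle]; omega
      rw [hpb]
      have hnb : pvNegBlock target s (k - 1) c = (s, k - 1, c) := by
        simp [pvNegBlock]; omega
      rw [hnb]; simp only
      have hfu : (target - s).toNat + (k - 1).toNat ≤ f := by omega
      rw [ih s (k - 1) c hs (by omega) hfu]
      rw [pvAltLoop_skip (target - s) k c (by omega) (by omega)]

-- the negative side: sum > target, k ≠ 0
theorem pvALoop_neg (target : Int) : ∀ (fuel : Nat) (s k c : Int), target < s → k ≠ 0 →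
    (s - target).toNat + k.natAbs ≤ fuel →
    pvALoop target fuel s k c = pvAltLoop (s - target) (k.natAbs : Int) c := by
  intro fuel
  induction fuel with
  | zero => intro s k c hs hk hf; omega
  | succ f ih =>
    intro s k c hs hk hf
    have hne : s ≠ target := by omega
    rw [pvALoop]
    simp only [hne, if_false]
    have hpb : pvPosBlock target s k c = (s, k, c) := by
      simp [pvPosBlock]; omega
    rw [hpb]
    set m : Int := (k.natAbs : Int) with hm
    have hmpos : 0 < m := by omega
    have hk2 : (if 0 < k then -k else k) = -m := by
      by_cases h : 0 < k
      · rw [if_pos h]; omega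
      · rw [if_neg h]; omega
    by_cases hfit : m ≤ s - target
    · -- subtract m
      have hcond : s + (-m) ≥ target ∧ ¬ (s + (-m) < target) := by constructor <;> omega
      have hnb : pvNegBlock target s k c = (s - m, -m, c + 1) := by
        simp only [pvNegBlock, hk2]
        rw [if_pos hs, if_pos hcond]
        rw [show s + -m = s - m from by ring]
      rw [hnb]; simp only
      by_cases hdone : s - m = target
      · rw [hdone, pvALoop_at_target]
        rw [pvAltLoop_sub (s - target) m c hmpos (by omega)]
        have h0 : s - target - m = 0 := by omega
        rw [h0, pvAltLoop]; simp
      · have hlt : target < s - m := by omega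
        have hmne : -m ≠ 0 := by omega
        have habs : (((-m).natAbs : Nat) : Int) = m := by omega
        have hfu : (s - m - target).toNat + (-m).natAbs ≤ f := by omega
        rw [ih (s - m) (-m) (c + 1) hlt hmne hfu]
        rw [pvAltLoop_sub (s - target) m c hmpos (by omega)]
        rw [habs]
        congr 1; omega
    · -- m too big: shrink |k|
      have hm2 : 2 ≤ m := by omega
      have hcond : ¬ (s + (-m) ≥ target ∧ ¬ (s + (-m) < target)) := by omega
      have hcond2 : s + (-m) < target := by omega
      have hnb : pvNegBlock target s k c = (s, -m + 1, c) := by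
        simp only [pvNegBlock, hk2]
        rw [if_pos hs, if_neg hcond, if_pos hcond2]
      rw [hnb]; simp only
      have hmne : -m + 1 ≠ 0 := by omega
      have hfu : (s - target).toNat + (-m + 1).natAbs ≤ f := by omega
      rw [ih s (-m + 1) c hs hmne hfu]
      have habs : (((-m + 1).natAbs : Nat) : Int) = m - 1 := by omega
      rw [habs]
      rw [pvAltLoop_skip (s - target) m c (by omega) (by omega)]

-- ===== VERDICT (by name: the statement is the Claim_ definition above) =====
theorem append_list_to_sum_target_optimised_spec : Claim_equal_append_list_to_sum_target_optimised := by
  intro nums k target _ hpre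
  unfold Spec_append_list_to_sum_target_optimised
  unfold Pre_append_list_to_sum_target_optimised at hpre
  unfold append_list_to_sum_target_optimised append_list_to_sum_target_optimised_alt
  set s := nums.foldl (· + ·) 0 with hsdef
  simp only at hpre ⊢
  rcases hpre with h | ⟨hlt, hk⟩ | ⟨hgt, hk⟩
  · rw [h, pvALoop_at_target]; simp
  · rw [pvALoop_pos target _ s k 0 hlt hk (by omega)]
    have h1 : target - s ≠ 0 := by omega
    rw [if_neg h1]
    rw [abs_of_pos (show (0:Int) < target - s by omega), abs_of_pos hk]
  · rw [pvALoop_neg target _ s k 0 hgt hk (by omega)]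
    have h1 : target - s ≠ 0 := by omega
    rw [if_neg h1]
    rw [show |target - s| = s - target from by rw [abs_of_neg (show target - s < 0 by omega)]; ring]
    rw [show |k| = (k.natAbs : Int) from Int.abs_eq_natAbs k]
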